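-- pv_equiv track=rewrite | github.com/HuuHuy227/ASR | chunkformer/utils/model_utils.py | gen_ctc_peak_time
-- ===== SOURCE A (Python) =====
-- from typing import List, Tuple
--
-- def gen_ctc_peak_time(hyp: List[int], blank_id: int = 0) -> List[int]:
--     times = []
--     cur = 0
--     while cur < len(hyp):
--         if hyp[cur] != blank_id:
--             times.append(cur)
--         prev = cur
--         while cur < len(hyp) and hyp[cur] == hyp[prev]:
--             cur += 1
--     return times
-- ===== SOURCE B (Python) =====
-- from typing import List
--
-- def gen_ctc_peak_time(hyp: List[int], blank_id: int = 0) -> List[int]: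
--     times = []
--     for i in range(len(hyp) - 1, -1, -1):
--         if hyp[i] != blank_id and (i == 0 or hyp[i] != hyp[i - 1]):
--             times.append(i)
--     times.reverse()
--     return times
-- ===== Notes on version B (the rewrite author's own statement) =====
-- stated objective: simpler
-- what changed: A skips whole runs with a nested inner while loop walking forward; B makes one backward index pass with no inner loop, detecting run starts by a local adjacency test (hyp[i] != hyp[i-1] or i == 0) and reversing the collected indices at the end.
import Mathlib
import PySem

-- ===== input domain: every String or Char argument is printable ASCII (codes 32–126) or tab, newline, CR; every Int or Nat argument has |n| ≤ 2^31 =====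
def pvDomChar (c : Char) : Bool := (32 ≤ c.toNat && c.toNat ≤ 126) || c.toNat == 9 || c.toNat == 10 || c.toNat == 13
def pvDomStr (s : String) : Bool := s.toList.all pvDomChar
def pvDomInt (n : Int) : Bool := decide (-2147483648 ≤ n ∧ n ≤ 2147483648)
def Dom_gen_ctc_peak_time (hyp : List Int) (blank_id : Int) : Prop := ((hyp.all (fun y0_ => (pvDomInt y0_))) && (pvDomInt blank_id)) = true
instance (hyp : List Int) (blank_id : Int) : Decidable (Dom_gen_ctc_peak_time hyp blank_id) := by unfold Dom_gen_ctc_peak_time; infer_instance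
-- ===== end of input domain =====

-- B replaces A's forward walk with a nested run-skipping inner loop by a single backward
-- index pass with a local adjacency test, reversing the result; objective: simpler.

-- ===== PORT A =====
-- inner while loop: 'while cur < len(hyp) and hyp[cur] == hyp[prev]: cur += 1' (v = hyp[prev]);
-- the fuel argument only makes the recursion structural: hyp.length - cur steps always suffice.
def pvInnerSkipF (hyp : List Int) (v : Int) : Nat → Nat → Nat
  | 0, cur => cur
  | fuel + 1, cur =>
      if h : cur < hyp.length then
        if hyp[cur] = v then pvInnerSkipF hyp v fuel (cur + 1) else cur
      else cur

def pvInnerSkip (hyp : List Int) (v : Int) (cur : Nat) : Nat :=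
  pvInnerSkipF hyp v (hyp.length - cur) cur

-- outer while loop of A, with the running index 'cur' and accumulator 'times'
-- (fuel likewise only bounds the number of iterations, which is at most hyp.length - cur)
def pvOuterLoopF (hyp : List Int) (blank_id : Int) : Nat → Nat → List Int → List Int
  | 0, _, times => times
  | fuel + 1, cur, times =>
      if h : cur < hyp.length then
        pvOuterLoopF hyp blank_id fuel (pvInnerSkip hyp hyp[cur] cur)
          (if hyp[cur] ≠ blank_id then times ++ [(cur : Int)] else times)
      else times

def gen_ctc_peak_time (hyp : List Int) (blank_id : Int) : List Int :=
  pvOuterLoopF hyp blank_id hyp.length 0 []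

-- ===== PORT B =====
-- the loop condition of B: hyp[i] != blank_id and (i == 0 or hyp[i] != hyp[i-1])
-- (indices produced by range(len(hyp)-1,-1,-1) are always in range, so getD's default is never used)
def pvIsPeak (hyp : List Int) (blank_id : Int) (i : Nat) : Bool :=
  decide (hyp.getD i 0 ≠ blank_id) && (i == 0 || decide (hyp.getD i 0 ≠ hyp.getD (i - 1) 0))

-- 'for i in range(len(hyp)-1, -1, -1): if …: times.append(i)'; counter k+1 processes index k
def pvBackLoop (hyp : List Int) (blank_id : Int) : Nat → List Int → List Int
  | 0, times => times
  | k + 1, times =>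
      pvBackLoop hyp blank_id k
        (if pvIsPeak hyp blank_id k then times ++ [(k : Int)] else times)

def gen_ctc_peak_time_alt (hyp : List Int) (blank_id : Int) : List Int :=
  (pvBackLoop hyp blank_id hyp.length []).reverse

-- ===== PRECONDITION & SPEC =====
def Spec_gen_ctc_peak_time (hyp : List Int) (blank_id : Int) (out : List Int) : Prop := out = gen_ctc_peak_time_alt hyp blank_id
instance (hyp : List Int) (blank_id : Int) (out : List Int) : Decidable (Spec_gen_ctc_peak_time hyp blank_id out) := by unfold Spec_gen_ctc_peak_time; infer_instance

-- ===== CLAIM (what is proved, stated in full; the proofs are below) =====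
def Claim_equal_gen_ctc_peak_time : Prop := ∀ (hyp : List Int) (blank_id : Int), Dom_gen_ctc_peak_time hyp blank_id → Spec_gen_ctc_peak_time hyp blank_id (gen_ctc_peak_time hyp blank_id)

-- ===== LEMMAS AND PROOFS =====

-- elements strictly inside the takeWhile prefix satisfy the predicate
theorem takeWhile_getD (p : Int → Bool) (l : List Int) :
    ∀ j, j < (l.takeWhile p).length → p (l.getD j 0) = true := by
  induction l with
  | nil => intro j hj; simp at hj
  | cons x xs ih =>
      intro j hj
      by_cases hx : p x
      · cases j with
        | zero => simpa [List.getD] using hx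
        | succ j =>
            simp only [List.takeWhile_cons, hx, if_true, List.length_cons] at hj
            simpa [List.getD] using ih j (by omega)
      · simp [hx] at hj

-- the first element after the takeWhile prefix fails the predicate
theorem takeWhile_stop (p : Int → Bool) (l : List Int)
    (h : (l.takeWhile p).length < l.length) :
    p (l.getD (l.takeWhile p).length 0) = false := by
  induction l with
  | nil => simp at h
  | cons x xs ih =>
      by_cases hx : p x
      · simp only [List.takeWhile_cons, hx, if_true, List.length_cons] at h ⊢
        simpa [List.getD] using ih (by omega)
      · simp [hx, List.getD]

theorem getD_drop (l : List Int) (n j : Nat) :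
    (l.drop n).getD j 0 = l.getD (n + j) 0 := by
  simp [List.getD_eq_getElem?_getD, List.getElem?_drop]

theorem pvInnerSkipF_eq (hyp : List Int) (v : Int) :
    ∀ (fuel cur : Nat), hyp.length - cur ≤ fuel →
      pvInnerSkipF hyp v fuel cur = cur + ((hyp.drop cur).takeWhile (· == v)).length := by
  intro fuel
  induction fuel with
  | zero =>
      intro cur hn
      have hge : hyp.length ≤ cur := by omega
      rw [pvInnerSkipF, List.drop_eq_nil_of_le hge]
      simp
  | succ fuel ih =>
      intro cur hn
      rw [pvInnerSkipF]
      split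
      · rename_i h
        rw [List.drop_eq_getElem_cons h]
        by_cases hv : hyp[cur] = v
        · rw [if_pos hv, ih (cur + 1) (by omega)]
          rw [List.takeWhile_cons]
          simp only [hv, beq_self_eq_true, if_true, List.length_cons]
          omega
        · rw [if_neg hv]
          simp [hv]
      · rename_i h
        rw [List.drop_eq_nil_of_le (Nat.le_of_not_lt h)]
        simp

theorem pvInnerSkip_eq (hyp : List Int) (cur : Nat) (h : cur < hyp.length) :
    pvInnerSkip hyp hyp[cur] cur
      = cur + 1 + ((hyp.drop (cur + 1)).takeWhile (· == hyp[cur])).length := by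
  rw [pvInnerSkip, pvInnerSkipF_eq hyp hyp[cur] _ cur le_rfl,
    List.drop_eq_getElem_cons h, List.takeWhile_cons]
  simp only [beq_self_eq_true, if_true, List.length_cons]
  omega

-- within the run starting at cur, every element equals hyp.getD cur 0
theorem run_const (hyp : List Int) (cur : Nat) (h : cur < hyp.length)
    (j : Nat) (h1 : cur ≤ j) (h2 : j < pvInnerSkip hyp hyp[cur] cur) :
    hyp.getD j 0 = hyp.getD cur 0 := by
  rcases Nat.eq_or_lt_of_le h1 with rfl | hlt
  · rfl
  · rw [pvInnerSkip_eq hyp cur h] at h2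
    have hj : j - (cur + 1) < ((hyp.drop (cur + 1)).takeWhile (· == hyp[cur])).length := by omega
    have := takeWhile_getD (· == hyp[cur]) (hyp.drop (cur + 1)) _ hj
    rw [getD_drop] at this
    have hje : cur + 1 + (j - (cur + 1)) = j := by omega
    rw [hje] at this
    simp only [beq_iff_eq] at this
    rw [this, List.getD_eq_getElem hyp 0 h]

-- the element just past the run differs from hyp.getD cur 0 (when still in range)
theorem run_stop (hyp : List Int) (cur : Nat) (h : cur < hyp.length)
    (hlt : pvInnerSkip hyp hyp[cur] cur < hyp.length) :
    hyp.getD (pvInnerSkip hyp hyp[cur] cur) 0 ≠ hyp.getD cur 0 := by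
  rw [pvInnerSkip_eq hyp cur h] at hlt ⊢
  have hlen : ((hyp.drop (cur + 1)).takeWhile (· == hyp[cur])).length
      < (hyp.drop (cur + 1)).length := by
    rw [List.length_drop]; omega
  have := takeWhile_stop (· == hyp[cur]) (hyp.drop (cur + 1)) hlen
  rw [getD_drop] at this
  simp only [beq_eq_false_iff_ne, ne_eq] at this
  intro hc
  rw [List.getD_eq_getElem hyp 0 h] at hc
  exact this hc

-- ===== A side: the outer loop produces exactly the adjacency-filtered indices ≥ cur =====
theorem pvOuter_filter (hyp : List Int) (blank_id : Int) :
    ∀ (fuel cur : Nat) (times : List Int), hyp.length - cur ≤ fuel →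
      (cur = 0 ∨ hyp.length ≤ cur ∨ hyp.getD cur 0 ≠ hyp.getD (cur - 1) 0) →
      pvOuterLoopF hyp blank_id fuel cur times
        = times ++ ((List.range' cur (hyp.length - cur)).filter
            (pvIsPeak hyp blank_id)).map (fun i => (i : Int)) := by
  intro fuel
  induction fuel with
  | zero =>
      intro cur times hn _
      have hz : hyp.length - cur = 0 := by omega
      rw [pvOuterLoopF, hz]
      simp
  | succ fuel ih =>
      intro cur times hn hinv
      rw [pvOuterLoopF]
      split
      · rename_i h
        set nxt := pvInnerSkip hyp hyp[cur] cur with hnxt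
        have hskip : nxt = cur + 1 + ((hyp.drop (cur + 1)).takeWhile (· == hyp[cur])).length :=
          pvInnerSkip_eq hyp cur h
        have hnle : nxt ≤ hyp.length := by
          have := (List.takeWhile_prefix (l := hyp.drop (cur + 1)) (p := (· == hyp[cur]))).length_le
          rw [List.length_drop] at this
          omega
        have hcn : cur < nxt := by omega
        -- invariant at nxt
        have hinv' : nxt = 0 ∨ hyp.length ≤ nxt ∨ hyp.getD nxt 0 ≠ hyp.getD (nxt - 1) 0 := by
          rcases Nat.lt_or_ge nxt hyp.length with hlt | hge
          · right; right
            have h1 := run_stop hyp cur h hlt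
            have h2 : hyp.getD (nxt - 1) 0 = hyp.getD cur 0 :=
              run_const hyp cur h (nxt - 1) (by omega) (by omega)
            rw [h2]; exact h1
          · right; left; exact hge
        rw [ih nxt _ (by omega) hinv']
        -- the head of the run is a peak iff it is non-blank
        have hpk : pvIsPeak hyp blank_id cur = decide (hyp.getD cur 0 ≠ blank_id) := by
          rcases hinv with rfl | hinv
          · simp [pvIsPeak]
          · rcases hinv with hge | hne
            · omega
            · have hc0 : cur ≠ 0 := by
                intro hc; rw [hc] at hne; simp at hne
              have hne' := hne
              simp only [List.getD_eq_getElem?_getD] at hne'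
              simp [pvIsPeak, hne']
        -- indices strictly inside the run are not peaks
        have hmid : ∀ j ∈ List.range' (cur + 1) (nxt - (cur + 1)),
            pvIsPeak hyp blank_id j = false := by
          intro j hj
          rw [List.mem_range'] at hj
          obtain ⟨i, hi, rfl⟩ := hj
          have e1 : hyp.getD (cur + 1 + i) 0 = hyp.getD cur 0 :=
            run_const hyp cur h _ (by omega) (by omega)
          have e2 : hyp.getD (cur + i) 0 = hyp.getD cur 0 :=
            run_const hyp cur h _ (by omega) (by omega)
          simp only [List.getD_eq_getElem?_getD] at e1 e2
          simp [pvIsPeak, e1, e2]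
        -- split range' cur (len-cur) at nxt
        have hs1 : List.range' cur (hyp.length - cur)
            = List.range' cur (nxt - cur) ++ List.range' nxt (hyp.length - nxt) := by
          rw [show hyp.length - cur = (nxt - cur) + (hyp.length - nxt) from by omega,
            ← List.range'_append, show cur + 1 * (nxt - cur) = nxt from by omega]
        have hs2 : List.range' cur (nxt - cur)
            = cur :: List.range' (cur + 1) (nxt - (cur + 1)) := by
          rw [show nxt - cur = (nxt - (cur + 1)) + 1 from by omega, List.range'_succ]
        rw [hs1, hs2]
        have hmidnil : (List.range' (cur + 1) (nxt - (cur + 1))).filter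
            (pvIsPeak hyp blank_id) = [] := List.filter_eq_nil_iff.mpr (by
              intro j hj; simp [hmid j hj])
        by_cases hb : hyp[cur] ≠ blank_id
        · have hbd : hyp.getD cur 0 ≠ blank_id := by
            rwa [List.getD_eq_getElem hyp 0 h]
          simp only [List.getD_eq_getElem?_getD] at hbd
          rw [if_pos hb]
          simp [List.filter_append, hpk, hbd, hmidnil]
        · have hbd : ¬ hyp.getD cur 0 ≠ blank_id := by
            rwa [List.getD_eq_getElem hyp 0 h]
          simp only [List.getD_eq_getElem?_getD] at hbd
          rw [if_neg hb]
          simp [List.filter_append, hpk, hbd, hmidnil]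
      · rename_i h
        have hz : hyp.length - cur = 0 := by omega
        rw [hz]
        simp

-- ===== B side: the backward loop produces the reversed adjacency-filtered indices =====
theorem pvBackLoop_filter (hyp : List Int) (blank_id : Int) :
    ∀ (k : Nat) (times : List Int),
      pvBackLoop hyp blank_id k times
        = times ++ (((List.range k).filter (pvIsPeak hyp blank_id)).map
            (fun i => (i : Int))).reverse := by
  intro k
  induction k with
  | zero => intro times; simp [pvBackLoop]
  | succ k ih =>
      intro times
      rw [pvBackLoop, ih, List.range_succ, List.filter_append, List.filter_cons]
      by_cases hp : pvIsPeak hyp blank_id k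
      · simp [hp]
      · simp [hp]

-- ===== VERDICT (by name: the statement is the Claim_ definition above) =====
theorem gen_ctc_peak_time_spec : Claim_equal_gen_ctc_peak_time := by
  intro hyp blank_id _
  unfold Spec_gen_ctc_peak_time gen_ctc_peak_time gen_ctc_peak_time_alt
  rw [pvOuter_filter hyp blank_id hyp.length 0 [] (by omega) (Or.inl rfl),
    pvBackLoop_filter hyp blank_id hyp.length []]
  simp [List.range_eq_range']
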